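-- pv_equiv track=rewrite | github.com/amuesing/sifters | sifters/test_velocity2.py | accent_velocity
-- ===== SOURCE A (Python) =====
-- def accent_velocity(binary, primary_modulo, secondary_modulo, overlap_value=120, primary_value=100, secondary_value=80, normal_value=60):
--     velocities = []
--     for i, value in enumerate(binary):
--         if value == 0:
--             velocities.append(0)
--         elif i % primary_modulo == 0 and i % secondary_modulo == 0:
--             velocities.append(overlap_value)
--         elif i % primary_modulo == 0:
--             velocities.append(primary_value)
--         elif i % secondary_modulo == 0:
--             velocities.append(secondary_value)
--         else:
--             velocities.append(normal_value)
--     return velocities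
-- ===== SOURCE B (Python) =====
-- def accent_velocity(binary, primary_modulo, secondary_modulo, overlap_value=120, primary_value=100, secondary_value=80, normal_value=60):
--     n = len(binary)
--     primary_step = abs(primary_modulo)
--     secondary_step = abs(secondary_modulo)
--     is_secondary = [False] * n
--     for i in range(0, n, secondary_step):
--         is_secondary[i] = True
--     velocities = [secondary_value if s else normal_value for s in is_secondary]
--     for i in range(0, n, primary_step):
--         velocities[i] = overlap_value if is_secondary[i] else primary_value
--     for i, value in enumerate(binary):
--         if value == 0:
--             velocities[i] = 0
--     return velocities
-- ===== Notes on version B (the rewrite author's own statement) =====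
-- stated objective: faster
-- what changed: Replaces A's single per-element modulo cascade with division-free strided passes: mark secondary multiples in a boolean mask, build the base row from the mask, overwrite primary multiples (overlap where the mask is set), then zero out positions whose binary value is 0.
-- outside the precondition, e.g. on accent_velocity([], 0, 1, 120, 100, 80, 60): A returns [], B raises ValueError; on accent_velocity([0, 0], 0, 1, 120, 100, 80, 60): A returns [0, 0], B raises ValueError
import Mathlib
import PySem

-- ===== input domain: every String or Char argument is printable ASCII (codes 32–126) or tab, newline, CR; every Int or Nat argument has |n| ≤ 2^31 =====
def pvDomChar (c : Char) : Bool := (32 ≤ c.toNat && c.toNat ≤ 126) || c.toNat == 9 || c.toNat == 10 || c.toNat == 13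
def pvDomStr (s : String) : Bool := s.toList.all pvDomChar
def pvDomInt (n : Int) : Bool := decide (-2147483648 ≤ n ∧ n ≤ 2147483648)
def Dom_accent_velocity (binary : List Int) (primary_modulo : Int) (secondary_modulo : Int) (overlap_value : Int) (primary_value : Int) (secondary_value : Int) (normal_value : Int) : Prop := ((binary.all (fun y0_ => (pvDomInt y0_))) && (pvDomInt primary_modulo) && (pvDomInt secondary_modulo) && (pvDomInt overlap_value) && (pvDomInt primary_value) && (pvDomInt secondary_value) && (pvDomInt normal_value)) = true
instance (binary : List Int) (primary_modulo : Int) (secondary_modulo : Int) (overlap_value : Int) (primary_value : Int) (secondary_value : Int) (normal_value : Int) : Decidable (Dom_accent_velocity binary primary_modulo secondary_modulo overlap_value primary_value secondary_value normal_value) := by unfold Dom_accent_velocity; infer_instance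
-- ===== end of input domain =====

-- B replaces A's per-element modulo cascade with division-free strided passes over a boolean
-- mask and the result row; same O(n) asymptotics; a timing run measured B faster at large n (constant factor).

-- ===== PORT A =====
def accent_velocity (binary : List Int) (primary_modulo : Int) (secondary_modulo : Int) (overlap_value : Int) (primary_value : Int) (secondary_value : Int) (normal_value : Int) : List Int :=
  (PySem.List.enumerate binary 0).foldl
    (fun velocities p =>
      if p.2 = 0 then velocities ++ [0]
      else if PySem.Int.mod p.1 primary_modulo = 0 ∧ PySem.Int.mod p.1 secondary_modulo = 0 then
        velocities ++ [overlap_value]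
      else if PySem.Int.mod p.1 primary_modulo = 0 then velocities ++ [primary_value]
      else if PySem.Int.mod p.1 secondary_modulo = 0 then velocities ++ [secondary_value]
      else velocities ++ [normal_value])
    []

-- ===== PORT B =====
-- (indices produced by range(0, n, step) are nonnegative and < n, so is_secondary[i] is
--  ported exactly by pyGetD with an arbitrary default, and velocities[i] = v by List.set)
def accent_velocity_alt (binary : List Int) (primary_modulo : Int) (secondary_modulo : Int) (overlap_value : Int) (primary_value : Int) (secondary_value : Int) (normal_value : Int) : List Int :=
  let n : Int := binary.length
  let primary_step : Int := |primary_modulo|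
  let secondary_step : Int := |secondary_modulo|
  let is_secondary : List Bool :=
    (PySem.List.pyRange 0 n secondary_step).foldl
      (fun r i => r.set i.toNat ((fun _ => true) i)) (List.replicate binary.length false)
  let velocities : List Int :=
    is_secondary.map (fun s => if s then secondary_value else normal_value)
  let velocities : List Int :=
    (PySem.List.pyRange 0 n primary_step).foldl
      (fun r i => r.set i.toNat
        (if PySem.List.pyGetD is_secondary i false then overlap_value else primary_value))
      velocities
  (PySem.List.enumerate binary 0).foldl
    (fun r p => if p.2 = 0 then r.set p.1.toNat 0 else r) velocities

-- ===== PRECONDITION & SPEC =====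
-- Pre_ excludes zero moduli: there A raises ZeroDivisionError at the first nonzero element,
-- and when no element is nonzero A returns the all-zero list only because the modulo is never
-- evaluated, while B's range step of 0 raises ValueError.
def Pre_accent_velocity (binary : List Int) (primary_modulo : Int) (secondary_modulo : Int) (overlap_value : Int) (primary_value : Int) (secondary_value : Int) (normal_value : Int) : Prop :=
  primary_modulo ≠ 0 ∧ secondary_modulo ≠ 0
instance (binary : List Int) (primary_modulo : Int) (secondary_modulo : Int) (overlap_value : Int) (primary_value : Int) (secondary_value : Int) (normal_value : Int) : Decidable (Pre_accent_velocity binary primary_modulo secondary_modulo overlap_value primary_value secondary_value normal_value) := by unfold Pre_accent_velocity; infer_instance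

def pvWitness_accent_velocity : List Int × Int × Int × Int × Int × Int × Int :=
  ([1, 0, 1, 1, 1, 1, 1], 2, 3, 120, 100, 80, 60)

def Spec_accent_velocity (binary : List Int) (primary_modulo : Int) (secondary_modulo : Int) (overlap_value : Int) (primary_value : Int) (secondary_value : Int) (normal_value : Int) (out : List Int) : Prop := out = accent_velocity_alt binary primary_modulo secondary_modulo overlap_value primary_value secondary_value normal_value
instance (binary : List Int) (primary_modulo : Int) (secondary_modulo : Int) (overlap_value : Int) (primary_value : Int) (secondary_value : Int) (normal_value : Int) (out : List Int) : Decidable (Spec_accent_velocity binary primary_modulo secondary_modulo overlap_value primary_value secondary_value normal_value out) := by unfold Spec_accent_velocity; infer_instance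

-- ===== CLAIM (what is proved, stated in full; the proofs are below) =====
def Claim_equal_accent_velocity : Prop := ∀ (binary : List Int) (primary_modulo : Int) (secondary_modulo : Int) (overlap_value : Int) (primary_value : Int) (secondary_value : Int) (normal_value : Int), Dom_accent_velocity binary primary_modulo secondary_modulo overlap_value primary_value secondary_value normal_value → Pre_accent_velocity binary primary_modulo secondary_modulo overlap_value primary_value secondary_value normal_value → Spec_accent_velocity binary primary_modulo secondary_modulo overlap_value primary_value secondary_value normal_value (accent_velocity binary primary_modulo secondary_modulo overlap_value primary_value secondary_value normal_value)

-- ===== LEMMAS AND PROOFS =====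

-- length is preserved by a strided-write fold
theorem pv_length_foldl_set {a : Type} (L : List Int) (f : Int → a) (res : List a) :
    (L.foldl (fun r i => r.set i.toNat (f i)) res).length = res.length := by
  induction L generalizing res with
  | nil => rfl
  | cons i L ih => simp [List.foldl_cons, ih]

-- a strided-write fold over nonnegative indices writes f j at position j iff j occurs in L
theorem pv_getElem?_foldl_set {a : Type} (L : List Int) (f : Int → a) (res : List a)
    (h0 : ∀ i ∈ L, 0 ≤ i) (j : Nat) (hj : j < res.length) :
    (L.foldl (fun r i => r.set i.toNat (f i)) res)[j]? =
      some (if (j : Int) ∈ L then f j else res[j]) := by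
  induction L generalizing res with
  | nil => simp [List.getElem?_eq_getElem hj]
  | cons i L ih =>
    have hi : 0 ≤ i := h0 i (by simp)
    have hlen : j < (res.set i.toNat (f i)).length := by simpa using hj
    rw [List.foldl_cons, ih (res.set i.toNat (f i)) (fun x hx => h0 x (by simp [hx])) hlen]
    by_cases hmem : (j : Int) ∈ L
    · simp [hmem]
    · by_cases heq : i = (j : Int)
      · have h2 : i.toNat = j := by omega
        simp [hmem, heq]
      · have h2 : i.toNat ≠ j := by omega
        have heq' : ¬ (j : Int) = i := fun h => heq h.symm
        simp [hmem, heq', h2]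

-- length is preserved by the zeroing pass
theorem pv_length_zero_pass (xs : List Int) (s : Int) (res : List Int) :
    ((PySem.List.enumerate xs s).foldl
        (fun r p => if p.2 = 0 then r.set p.1.toNat 0 else r) res).length = res.length := by
  induction xs generalizing s res with
  | nil => simp [PySem.List.enumerate_nil]
  | cons x xs ih =>
    rw [PySem.List.enumerate_cons, List.foldl_cons]
    by_cases hx : x = 0 <;> simp [hx, ih]

-- the zeroing pass writes 0 at position j iff the corresponding element of xs is 0
theorem pv_getElem?_zero_pass (xs : List Int) (s : Nat) (res : List Int) (j : Nat)
    (hj : j < res.length) :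
    ((PySem.List.enumerate xs (s : Int)).foldl
        (fun r p => if p.2 = 0 then r.set p.1.toNat 0 else r) res)[j]? =
      some (if s ≤ j ∧ xs.getD (j - s) 1 = 0 then 0 else res[j]) := by
  induction xs generalizing s res with
  | nil => simp [PySem.List.enumerate_nil, List.getD, List.getElem?_eq_getElem hj]
  | cons x xs ih =>
    rw [PySem.List.enumerate_cons, List.foldl_cons]
    have hcast : (s : Int) + 1 = ((s + 1 : Nat) : Int) := by push_cast; ring
    rw [hcast]
    dsimp only
    by_cases hx : x = 0
    · rw [if_pos hx]
      have hlen2 : j < (res.set (s : Int).toNat 0).length := by simpa using hj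
      rw [ih (s + 1) _ hlen2]
      simp only [Int.toNat_natCast]
      by_cases hsj : s = j
      · subst hsj
        have hA : ¬ (s + 1 ≤ s) := by omega
        simp [hA, hx, List.getElem_set]
      · have hset : (res.set s 0)[j]'(by simpa using hj) = res[j] := by
          rw [List.getElem_set]; simp [hsj]
        by_cases hlt : s < j
        · have h1 : j - s = (j - (s + 1)) + 1 := by omega
          rw [h1, List.getD_cons_succ, hset]
          by_cases hC : xs.getD (j - (s + 1)) 1 = 0 <;>
            simp [hC, (by omega : s + 1 ≤ j), (by omega : s ≤ j)]
        · have h2 : ¬ s ≤ j := by omega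
          have h3 : ¬ s + 1 ≤ j := by omega
          rw [hset]; simp [h2, h3]
    · rw [if_neg hx]
      rw [ih (s + 1) _ hj]
      by_cases hsj : s = j
      · subst hsj
        have hA : ¬ (s + 1 ≤ s) := by omega
        simp [hA, hx]
      · by_cases hlt : s < j
        · have h1 : j - s = (j - (s + 1)) + 1 := by omega
          rw [h1, List.getD_cons_succ]
          by_cases hC : xs.getD (j - (s + 1)) 1 = 0 <;>
            simp [hC, (by omega : s + 1 ≤ j), (by omega : s ≤ j)]
        · have h2 : ¬ s ≤ j := by omega
          have h3 : ¬ s + 1 ≤ j := by omega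
          simp [h2, h3]

-- A's fold is a map of the selection cascade over the enumeration
theorem pv_A_eq_map (binary : List Int) (pm sm ov pv sv nv : Int) :
    accent_velocity binary pm sm ov pv sv nv =
      (PySem.List.enumerate binary 0).map (fun p =>
        if p.2 = 0 then 0
        else if PySem.Int.mod p.1 pm = 0 ∧ PySem.Int.mod p.1 sm = 0 then ov
        else if PySem.Int.mod p.1 pm = 0 then pv
        else if PySem.Int.mod p.1 sm = 0 then sv
        else nv) := by
  unfold accent_velocity
  rw [show (fun (velocities : List Int) (p : Int × Int) =>
      if p.2 = 0 then velocities ++ [0]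
      else if PySem.Int.mod p.1 pm = 0 ∧ PySem.Int.mod p.1 sm = 0 then velocities ++ [ov]
      else if PySem.Int.mod p.1 pm = 0 then velocities ++ [pv]
      else if PySem.Int.mod p.1 sm = 0 then velocities ++ [sv]
      else velocities ++ [nv]) =
    (fun (velocities : List Int) (p : Int × Int) => velocities ++
      [if p.2 = 0 then 0
       else if PySem.Int.mod p.1 pm = 0 ∧ PySem.Int.mod p.1 sm = 0 then ov
       else if PySem.Int.mod p.1 pm = 0 then pv
       else if PySem.Int.mod p.1 sm = 0 then sv
       else nv]) from by funext r p; dsimp only; split_ifs <;> rfl]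
  rw [PySem.List.foldl_append_singleton_eq_map]
  simp

-- ===== VERDICT (by name: the statement is the Claim_ definition above) =====
theorem accent_velocity_spec : Claim_equal_accent_velocity := by
  intro binary pm sm ov pv sv nv _ hpre
  unfold Spec_accent_velocity
  obtain ⟨hpm, hsm⟩ := hpre
  have hps : (0 : Int) < |pm| := by positivity
  have hss : (0 : Int) < |sm| := by positivity
  rw [pv_A_eq_map]
  have hBeq : accent_velocity_alt binary pm sm ov pv sv nv =
      (PySem.List.enumerate binary 0).foldl
        (fun r p => if p.2 = 0 then r.set p.1.toNat 0 else r)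
        ((PySem.List.pyRange 0 (binary.length : Int) |pm|).foldl
          (fun r i => r.set i.toNat
            (if PySem.List.pyGetD ((PySem.List.pyRange 0 (binary.length : Int) |sm|).foldl
                (fun r i => r.set i.toNat ((fun _ => true) i))
                (List.replicate binary.length false)) i false then ov else pv))
          (((PySem.List.pyRange 0 (binary.length : Int) |sm|).foldl
              (fun r i => r.set i.toNat ((fun _ => true) i))
              (List.replicate binary.length false)).map
            (fun s => if s then sv else nv))) := rfl
  rw [hBeq]
  set mask := (PySem.List.pyRange 0 (binary.length : Int) |sm|).foldl
      (fun r i => r.set i.toNat ((fun _ => true) i)) (List.replicate binary.length false)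
    with hmaskdef
  have hnonneg_s : ∀ i ∈ PySem.List.pyRange 0 (binary.length : Int) |sm|, 0 ≤ i :=
    fun i hi => ((PySem.List.mem_pyRange_iff_of_pos hss i).1 hi).1
  have hnonneg_p : ∀ i ∈ PySem.List.pyRange 0 (binary.length : Int) |pm|, 0 ≤ i :=
    fun i hi => ((PySem.List.mem_pyRange_iff_of_pos hps i).1 hi).1
  have hmask_len : mask.length = binary.length := by
    rw [hmaskdef, pv_length_foldl_set, List.length_replicate]
  set vel2 := (PySem.List.pyRange 0 (binary.length : Int) |pm|).foldl
      (fun r i => r.set i.toNat (if PySem.List.pyGetD mask i false then ov else pv))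
      (mask.map fun s => if s then sv else nv) with hvel2def
  have hvel2_len : vel2.length = binary.length := by
    rw [hvel2def, pv_length_foldl_set, List.length_map, hmask_len]
  apply List.ext_getElem?
  intro j
  by_cases hj : j < binary.length
  · have hb : (j : Int) < (binary.length : Int) := by exact_mod_cast hj
    have hmem_s : ((j : Int) ∈ PySem.List.pyRange 0 (binary.length : Int) |sm|) ↔ sm ∣ (j : Int) := by
      rw [PySem.List.mem_pyRange_iff_of_pos hss]
      constructor
      · rintro ⟨-, -, h⟩; rw [← abs_dvd]; simpa using h
      · intro h; exact ⟨by positivity, hb, by rw [sub_zero, abs_dvd]; exact h⟩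
    have hmem_p : ((j : Int) ∈ PySem.List.pyRange 0 (binary.length : Int) |pm|) ↔ pm ∣ (j : Int) := by
      rw [PySem.List.mem_pyRange_iff_of_pos hps]
      constructor
      · rintro ⟨-, -, h⟩; rw [← abs_dvd]; simpa using h
      · intro h; exact ⟨by positivity, hb, by rw [sub_zero, abs_dvd]; exact h⟩
    have hjm : j < mask.length := by rw [hmask_len]; exact hj
    have hmaskj : mask[j]'hjm = (if sm ∣ (j : Int) then true else false) := by
      have h1 : mask[j]? = some (if (j : Int) ∈ PySem.List.pyRange 0 (binary.length : Int) |sm|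
          then true else false) := by
        rw [hmaskdef]
        have := pv_getElem?_foldl_set (PySem.List.pyRange 0 (binary.length : Int) |sm|)
          (fun _ => true) (List.replicate binary.length false) hnonneg_s j (by simpa using hj)
        simpa using this
      rw [List.getElem?_eq_getElem hjm, Option.some_inj] at h1
      rw [h1]
      by_cases hq : sm ∣ (j : Int) <;> simp [hq, hmem_s]
    have hgetD : PySem.List.pyGetD mask (j : Int) false = mask[j]'hjm := by
      rw [PySem.List.pyGetD_eq_getElem mask false (by positivity) (by rw [hmask_len]; exact hb)]
      simp
    have hjv : j < vel2.length := by rw [hvel2_len]; exact hj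
    have hvel2j : vel2[j]'hjv =
        (if pm ∣ (j : Int) then (if sm ∣ (j : Int) then ov else pv)
         else (if sm ∣ (j : Int) then sv else nv)) := by
      have h1 : vel2[j]? = some (if (j : Int) ∈ PySem.List.pyRange 0 (binary.length : Int) |pm|
          then (if PySem.List.pyGetD mask (j : Int) false then ov else pv)
          else (mask.map fun s => if s then sv else nv)[j]'(by
            rw [List.length_map, hmask_len]; exact hj)) := by
        rw [hvel2def]
        exact pv_getElem?_foldl_set _ _ _ hnonneg_p j (by rw [List.length_map, hmask_len]; exact hj)
      rw [List.getElem?_eq_getElem hjv, Option.some_inj] at h1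
      rw [h1, hgetD, hmaskj, List.getElem_map]
      by_cases hp : pm ∣ (j : Int) <;> by_cases hq : sm ∣ (j : Int) <;>
        simp [hp, hq, hmem_p, hmaskj]
    have hz := pv_getElem?_zero_pass binary 0 vel2 j hjv
    simp only [Nat.cast_zero] at hz
    rw [hz]
    rw [List.getElem?_map, PySem.List.getElem?_enumerate, List.getElem?_eq_getElem hj]
    simp only [Option.map_some, zero_add, Nat.sub_zero, Nat.zero_le, true_and,
      List.getD_eq_getElem binary 1 hj, Option.some_inj]
    rw [hvel2j]
    by_cases h0 : binary[j] = 0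
    · simp [h0]
    · by_cases hp : pm ∣ (j : Int) <;> by_cases hq : sm ∣ (j : Int) <;>
        simp [h0, hp, hq, PySem.Int.mod_eq_zero_iff_dvd]
  · have h1 : ((PySem.List.enumerate binary 0).map (fun p =>
        if p.2 = 0 then 0
        else if PySem.Int.mod p.1 pm = 0 ∧ PySem.Int.mod p.1 sm = 0 then ov
        else if PySem.Int.mod p.1 pm = 0 then pv
        else if PySem.Int.mod p.1 sm = 0 then sv
        else nv)).length = binary.length := by
      rw [List.length_map, PySem.List.length_enumerate]
    have h2 : ((PySem.List.enumerate binary 0).foldl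
        (fun r p => if p.2 = 0 then r.set p.1.toNat 0 else r) vel2).length = binary.length := by
      rw [pv_length_zero_pass, hvel2_len]
    rw [List.getElem?_eq_none (by omega), List.getElem?_eq_none (by omega)]
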